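-- pv_equiv track=rewrite | github.com/FabioChiappina/Manufactor | src/core/mana.py | colors_to_wubrg_order
-- ===== SOURCE A (Python) =====
-- from typing import Optional, List, Dict
--
-- def colors_to_wubrg_order(
--     colors: List[str]
-- ) -> List[str]:
--     """
--     Sort colors to WUBRG order (non-wrapping).
--
--     Args:
--         colors: List of color codes
--
--     Returns:
--         Sorted list in WUBRG order
--     """
--     sorted_colors = []
--     for color in "wubrgcs":
--         if color in colors:
--             sorted_colors.append(color)
--     return sorted_colors
-- ===== SOURCE B (Python) =====
-- def colors_to_wubrg_order(colors):
--     """Sort colors to WUBRG order (non-wrapping)."""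
--     present = set(colors) & set("wubrgcs")
--     return sorted(present, key="wubrgcs".index)
-- ===== Notes on version B (the rewrite author's own statement) =====
-- stated objective: idiomatic
-- what changed: B replaces A's scan of the fixed priority string with appends into an accumulator by a set intersection (dedup + filter in one step) followed by sorted() keyed on the position in "wubrgcs".
import Mathlib
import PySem

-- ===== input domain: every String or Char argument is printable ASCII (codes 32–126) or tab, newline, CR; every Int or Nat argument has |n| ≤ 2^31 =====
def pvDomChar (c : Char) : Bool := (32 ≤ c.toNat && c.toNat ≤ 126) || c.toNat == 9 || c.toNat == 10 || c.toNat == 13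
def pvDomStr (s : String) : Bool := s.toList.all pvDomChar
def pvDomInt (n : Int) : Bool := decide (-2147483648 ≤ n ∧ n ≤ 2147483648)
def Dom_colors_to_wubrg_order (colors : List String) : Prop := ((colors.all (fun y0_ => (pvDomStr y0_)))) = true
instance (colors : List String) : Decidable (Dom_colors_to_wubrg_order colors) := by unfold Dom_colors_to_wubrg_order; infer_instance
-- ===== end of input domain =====

-- B replaces A's fixed-order scan-and-append loop with a set intersection plus sorted() keyed by
-- position in "wubrgcs" (idiomatic, not faster); return values agree on all inputs.

-- ===== PORT A =====
-- for color in "wubrgcs": if color in colors: sorted_colors.append(color)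
def colors_to_wubrg_order (colors : List String) : List String :=
  ["w", "u", "b", "r", "g", "c", "s"].foldl
    (fun sorted_colors color =>
      if colors.contains color then sorted_colors ++ [color] else sorted_colors) []

-- ===== PORT B =====
-- present = set(colors) & set("wubrgcs"); return sorted(present, key="wubrgcs".index)
-- ".index" is ported as PySem.Str.find: every element the key is applied to is a member of
-- "wubrgcs"'s characters, where find = index (index never raises here); the key is injective
-- on the set, so the sorted order is well defined.
def colors_to_wubrg_order_alt (colors : List String) : List String :=
  PySem.List.sorted
    (PySem.Set.inter (PySem.Set.ofList colors)
      (PySem.Set.ofList ["w", "u", "b", "r", "g", "c", "s"]))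
    (fun s => PySem.Str.find "wubrgcs" s) false

-- ===== PRECONDITION & SPEC =====
def Spec_colors_to_wubrg_order (colors : List String) (out : List String) : Prop := out = colors_to_wubrg_order_alt colors
instance (colors : List String) (out : List String) : Decidable (Spec_colors_to_wubrg_order colors out) := by unfold Spec_colors_to_wubrg_order; infer_instance

-- ===== CLAIM (what is proved, stated in full; the proofs are below) =====
def Claim_equal_colors_to_wubrg_order : Prop := ∀ (colors : List String), Dom_colors_to_wubrg_order colors → Spec_colors_to_wubrg_order colors (colors_to_wubrg_order colors)

-- ===== LEMMAS AND PROOFS =====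

-- A's loop is exactly the filter of the fixed priority list by membership in `colors`.
theorem portA_eq_filter (colors : List String) :
    colors_to_wubrg_order colors
      = (["w", "u", "b", "r", "g", "c", "s"].filter colors.contains) := by
  rw [colors_to_wubrg_order, PySem.List.foldl_append_if]
  simp

-- B equals the same filtered list: it is a permutation of the intersection set and is
-- strictly increasing under the key, so it names sorted()'s result.
theorem portB_eq_filter (colors : List String) :
    colors_to_wubrg_order_alt colors
      = (["w", "u", "b", "r", "g", "c", "s"].filter colors.contains) := by
  unfold colors_to_wubrg_order_alt
  apply PySem.List.sorted_eq_of_perm_of_pairwise_lt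
  · have h1 : (["w", "u", "b", "r", "g", "c", "s"].filter colors.contains).Nodup :=
      List.Nodup.filter colors.contains (by decide)
    have h2 : (PySem.Set.inter (PySem.Set.ofList colors)
        (PySem.Set.ofList ["w", "u", "b", "r", "g", "c", "s"])).Nodup :=
      PySem.Set.nodup_inter _ _ (PySem.Set.nodup_ofList colors)
    rw [List.perm_ext_iff_of_nodup h1 h2]
    intro x
    simp [PySem.Set.mem_inter, PySem.Set.mem_ofList, List.mem_filter, and_comm]
  · exact List.Pairwise.sublist (List.filter_sublist) (by decide)

-- ===== VERDICT (by name: the statement is the Claim_ definition above) =====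
theorem colors_to_wubrg_order_spec : Claim_equal_colors_to_wubrg_order := by
  intro colors _
  unfold Spec_colors_to_wubrg_order
  rw [portA_eq_filter, portB_eq_filter]
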